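-- pv_equiv track=rewrite | github.com/KimDaeUng/py_algo | 개인문제/Programmers_Basic/약수의-개수와-덧셈.py | div_n_even
-- ===== SOURCE A (Python) =====
-- def div_n_even(x):
--     cnt = 0
--     for i in range(1, x + 1):
--         if x % i == 0:
--             cnt += 1
--
--     if cnt % 2 == 0:
--         return True
--     else:
--         return False
-- ===== SOURCE B (Python) =====
-- def div_n_even(x):
--     # x has an even number of divisors iff it is not a perfect square,
--     # so find the integer square root by scanning candidates (O(sqrt(x)))
--     # instead of counting all divisors (O(x)).
--     if x <= 0:
--         return True
--     i = 1
--     while i * i < x: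
--         i += 1
--     return i * i != x
-- ===== Notes on version B (the rewrite author's own statement) =====
-- stated objective: faster
-- what changed: B replaces the O(x) divisor-counting loop by a perfect-square test (even divisor count iff x is not a perfect square), finding the integer square root in O(sqrt(x)).
import Mathlib
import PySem

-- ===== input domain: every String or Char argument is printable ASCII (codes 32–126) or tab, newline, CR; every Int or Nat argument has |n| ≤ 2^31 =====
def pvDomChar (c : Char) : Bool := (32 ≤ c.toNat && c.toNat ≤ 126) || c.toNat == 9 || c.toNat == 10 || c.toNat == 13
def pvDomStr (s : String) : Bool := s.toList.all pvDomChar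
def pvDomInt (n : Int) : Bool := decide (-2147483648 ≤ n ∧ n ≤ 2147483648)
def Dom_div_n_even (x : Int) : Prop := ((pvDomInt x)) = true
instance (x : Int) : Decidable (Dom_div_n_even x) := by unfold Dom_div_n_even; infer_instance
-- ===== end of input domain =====

-- B replaces A's O(x) divisor-counting loop by a perfect-square test
-- (a positive integer has an even number of divisors iff it is not a perfect square).


-- ===== PORT A =====
def div_n_even (x : Int) : Bool :=
  -- cnt = number of i in range(1, x+1) with x % i == 0
  if PySem.Int.mod
      ((PySem.List.pyRange 1 (x + 1) 1).foldl
        (fun cnt i => if PySem.Int.mod x i == 0 then cnt + 1 else cnt) 0)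
      2 == 0 then true else false

-- ===== PORT B =====
-- the `while i * i < x: i += 1` loop of Source B
def bloop (x i : Int) : Int :=
  if i * i < x then bloop x (i + 1) else i
termination_by (x + 1 - i).toNat
decreasing_by
  rename_i h
  have hii : i ≤ i * i := by
    by_cases h0 : i ≤ 0
    · nlinarith [mul_self_nonneg i]
    · nlinarith [lt_of_not_ge h0]
  omega

def div_n_even_alt (x : Int) : Bool :=
  if x ≤ 0 then true
  else
    let i := bloop x 1
    !(i * i == x)

-- ===== PRECONDITION & SPEC =====
def Spec_div_n_even (x : Int) (out : Bool) : Prop := out = div_n_even_alt x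
instance (x : Int) (out : Bool) : Decidable (Spec_div_n_even x out) := by unfold Spec_div_n_even; infer_instance

-- ===== CLAIM (what is proved, stated in full; the proofs are below) =====
def Claim_equal_div_n_even : Prop := ∀ (x : Int), Dom_div_n_even x → Spec_div_n_even x (div_n_even x)

-- ===== LEMMAS AND PROOFS =====

lemma countP_range_eq (p : ℕ → Bool) (n : ℕ) :
    (List.range n).countP p = (Finset.filter (fun k => p k = true) (Finset.range n)).card := by
  induction n with
  | zero => simp
  | succ n ih =>
      rw [List.range_succ, List.countP_append, Finset.range_add_one, Finset.filter_insert]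
      by_cases h : p n
      · rw [if_pos h, Finset.card_insert_of_notMem (by simp)]
        simp [h, ih]
      · rw [if_neg h]
        simp [h, ih]

lemma card_filter_succ_dvd (n : ℕ) (hn : n ≠ 0) :
    (Finset.filter (fun k => (k + 1) ∣ n) (Finset.range n)).card = n.divisors.card := by
  apply Finset.card_bij (fun k _ => k + 1)
  · intro a ha
    simp only [Finset.mem_filter, Finset.mem_range] at ha
    exact Nat.mem_divisors.mpr ⟨ha.2, hn⟩
  · intro a₁ _ a₂ _ h; omega
  · intro b hb
    obtain ⟨hdvd, _⟩ := Nat.mem_divisors.mp hb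
    have hb1 : 1 ≤ b := by
      rcases Nat.eq_zero_or_pos b with rfl | h
      · exact absurd (Nat.eq_zero_of_zero_dvd hdvd) hn
      · exact h
    have hbn : b ≤ n := Nat.le_of_dvd (Nat.pos_of_ne_zero hn) hdvd
    refine ⟨b - 1, ?_, by omega⟩
    simp only [Finset.mem_filter, Finset.mem_range]
    constructor
    · omega
    · rwa [Nat.sub_add_cancel hb1]

-- parity of the divisor count: odd iff the number is a perfect square
lemma odd_card_divisors_iff (n : ℕ) (hn : n ≠ 0) :
    Odd n.divisors.card ↔ IsSquare n := by
  have hsplit := Finset.card_filter_add_card_filter_not (s := n.divisors) (fun d => n / d = d)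
  -- the non-fixed part of the involution d ↦ n / d has even cardinality
  have hz : (((Finset.filter (fun d => ¬ n / d = d) n.divisors).card : ℕ) : ZMod 2) = 0 := by
    have hsum : (∑ _d ∈ Finset.filter (fun d => ¬ n / d = d) n.divisors, (1 : ZMod 2)) = 0 := by
      refine Finset.sum_involution (fun d _ => n / d) (fun a _ => by decide)
        (fun a ha _ => by
          simp only [Finset.mem_filter] at ha
          exact ha.2)
        (fun a ha => by
          simp only [Finset.mem_filter, Nat.mem_divisors] at ha ⊢
          obtain ⟨⟨hd, _⟩, hne⟩ := ha
          refine ⟨⟨Nat.div_dvd_of_dvd hd, hn⟩, ?_⟩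
          rw [Nat.div_div_self hd hn]
          exact fun h => hne h.symm)
        (fun a ha => by
          simp only [Finset.mem_filter, Nat.mem_divisors] at ha
          exact Nat.div_div_self ha.1.1 hn)
    calc (((Finset.filter (fun d => ¬ n / d = d) n.divisors).card : ℕ) : ZMod 2)
        = ∑ _d ∈ Finset.filter (fun d => ¬ n / d = d) n.divisors, (1 : ZMod 2) := by
          simp [Finset.sum_const, nsmul_eq_mul]
      _ = 0 := hsum
  obtain ⟨m, hm⟩ := (ZMod.natCast_eq_zero_iff _ 2).mp hz
  by_cases hsq : IsSquare n
  · obtain ⟨r, hr⟩ := hsq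
    have hr0 : r ≠ 0 := by
      rintro rfl
      rw [Nat.mul_zero] at hr
      exact hn hr
    have hfix : Finset.filter (fun d => n / d = d) n.divisors = {r} := by
      ext d
      simp only [Finset.mem_filter, Nat.mem_divisors, Finset.mem_singleton]
      constructor
      · rintro ⟨⟨hd, _⟩, hq⟩
        have hdd : d * d = n := by
          conv_rhs => rw [← Nat.div_mul_cancel hd, hq]
        exact Nat.mul_self_inj.mp (by rw [hdd, hr])
      · intro hdr
        rw [hdr]
        have hdvd : r ∣ n := ⟨r, hr⟩
        refine ⟨⟨hdvd, hn⟩, ?_⟩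
        rw [hr]
        exact Nat.mul_div_cancel_left r (Nat.pos_of_ne_zero hr0)
    rw [hfix, Finset.card_singleton] at hsplit
    constructor
    · intro _; exact ⟨r, hr⟩
    · intro _
      rw [Nat.odd_iff]
      omega
  · have hfix : Finset.filter (fun d => n / d = d) n.divisors = ∅ := by
      ext d
      simp only [Finset.mem_filter, Nat.mem_divisors, Finset.notMem_empty, iff_false]
      rintro ⟨⟨hd, _⟩, hq⟩
      exact hsq ⟨d, by conv_lhs => rw [← Nat.div_mul_cancel hd, hq]⟩
    rw [hfix, Finset.card_empty] at hsplit
    constructor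
    · intro hodd
      rw [Nat.odd_iff] at hodd
      omega
    · intro h; exact absurd h hsq

-- A computes: "the divisor count of x.toNat is even"
lemma a_char (x : Int) (hx : 1 ≤ x) :
    div_n_even x = decide (Even x.toNat.divisors.card) := by
  unfold div_n_even
  rw [PySem.List.foldl_count_if, PySem.List.pyRange_one, List.countP_map]
  have hxx : ((x.toNat : ℤ)) = x := Int.toNat_of_nonneg (by omega)
  have hc : (List.range (x + 1 - 1).toNat).countP
        ((fun i => PySem.Int.mod x i == 0) ∘ fun k : ℕ => 1 + (k : ℤ))
      = (Finset.filter (fun k => (k + 1) ∣ x.toNat) (Finset.range x.toNat)).card := by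
    have h1 : (x + 1 - 1).toNat = x.toNat := by omega
    rw [h1, countP_range_eq]
    congr 1
    apply Finset.filter_congr
    intro k _
    simp only [Function.comp_apply, beq_iff_eq, PySem.Int.mod_eq_zero_iff_dvd]
    constructor
    · intro h
      have : ((k + 1 : ℕ) : ℤ) ∣ ((x.toNat : ℤ)) := by
        rw [hxx]
        convert h using 2
        push_cast; ring
      exact_mod_cast this
    · intro h
      have : ((k + 1 : ℕ) : ℤ) ∣ ((x.toNat : ℤ)) := Int.natCast_dvd_natCast.mpr h
      rw [hxx] at this
      convert this using 2
      push_cast; ring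
  rw [hc, card_filter_succ_dvd _ (by omega), zero_add]
  have hiff : (PySem.Int.mod ((x.toNat.divisors.card : ℕ) : ℤ) 2 = 0) ↔ Even x.toNat.divisors.card := by
    rw [PySem.Int.mod_eq_zero_iff_dvd, show ((2:ℤ)) = ((2:ℕ):ℤ) from rfl,
      Int.natCast_dvd_natCast, Nat.dvd_iff_mod_eq_zero, Nat.even_iff]
  have hcond : ((PySem.Int.mod ((x.toNat.divisors.card : ℕ) : ℤ) 2 == 0) = true) ↔
      Even x.toNat.divisors.card := by
    rw [beq_iff_eq]; exact hiff
  by_cases he : Even x.toNat.divisors.card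
  · rw [if_pos (hcond.mpr he)]
    simp [he]
  · rw [if_neg (fun h => he (hcond.mp h))]
    simp [he]

-- the while-loop finds the first i with i*i ≥ x; its square equals x iff x is a square
lemma bloop_sq (x : Int) : ∀ i : Int,
    1 ≤ i → (∀ j : Int, 1 ≤ j → j < i → j * j < x) →
    (bloop x i * bloop x i = x ↔ ∃ k : Int, 1 ≤ k ∧ k * k = x) := by
  refine bloop.induct x (motive := fun i => 1 ≤ i →
    (∀ j : Int, 1 ≤ j → j < i → j * j < x) →
    (bloop x i * bloop x i = x ↔ ∃ k : Int, 1 ≤ k ∧ k * k = x)) ?_ ?_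
  · intro i hlt ih h1 hinv
    rw [bloop, if_pos hlt]
    refine ih (by omega) ?_
    intro j hj1 hj2
    rcases lt_or_eq_of_le (by omega : j ≤ i) with h | h
    · exact hinv j hj1 h
    · rw [h]; exact hlt
  · intro i hge h1 hinv
    rw [bloop, if_neg hge]
    constructor
    · intro h; exact ⟨i, h1, h⟩
    · rintro ⟨k, hk1, hk⟩
      have hki : i ≤ k := by
        by_contra hc
        have := hinv k hk1 (lt_of_not_ge hc)
        omega
      have hle : i * i ≤ k * k := by nlinarith
      omega

lemma exists_sq_iff (x : Int) (hx : 1 ≤ x) :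
    (∃ k : Int, 1 ≤ k ∧ k * k = x) ↔ IsSquare x.toNat := by
  have h1 : ((x.toNat : ℤ)) = x := Int.toNat_of_nonneg (by omega)
  constructor
  · rintro ⟨k, hk1, hk⟩
    have h2 : ((k.toNat : ℤ)) = k := Int.toNat_of_nonneg (by omega)
    refine ⟨k.toNat, ?_⟩
    have : ((x.toNat : ℤ)) = ((k.toNat : ℤ)) * ((k.toNat : ℤ)) := by
      rw [h1, h2, hk]
    exact_mod_cast this
  · rintro ⟨r, hr⟩
    have hr0 : r ≠ 0 := by
      rintro rfl
      rw [Nat.mul_zero] at hr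
      omega
    refine ⟨(r : ℤ), ?_, ?_⟩
    · exact_mod_cast Nat.one_le_iff_ne_zero.mpr hr0
    · rw [← h1, hr]; push_cast; ring

-- ===== VERDICT (by name: the statement is the Claim_ definition above) =====
theorem div_n_even_spec : Claim_equal_div_n_even := by
  intro x _
  unfold Spec_div_n_even
  by_cases hx : x ≤ 0
  · unfold div_n_even div_n_even_alt
    rw [PySem.List.pyRange_one_eq_nil (by omega)]
    simp only [List.foldl_nil, if_pos hx]
    norm_num [show PySem.Int.mod 0 2 = 0 from by decide]
  · have hx1 : 1 ≤ x := by omega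
    rw [a_char x hx1]
    unfold div_n_even_alt
    rw [if_neg (by omega)]
    have hb := bloop_sq x 1 le_rfl (by intro j h1 h2; omega)
    rw [exists_sq_iff x hx1] at hb
    have hodd := odd_card_divisors_iff x.toNat (by omega)
    by_cases hs : bloop x 1 * bloop x 1 = x
    · have hsq : IsSquare x.toNat := hb.mp hs
      have ho : Odd x.toNat.divisors.card := hodd.mpr hsq
      simp [hs, Nat.not_even_iff_odd, ho]
    · have hsq : ¬ IsSquare x.toNat := fun h => hs (hb.mpr h)
      have he : Even x.toNat.divisors.card := by
        rcases Nat.even_or_odd x.toNat.divisors.card with h | h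
        · exact h
        · exact absurd (hodd.mp h) hsq
      simp [hs, he]
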